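-- pv_equiv track=rewrite | github.com/Mamba413/L2D | scripts/detect_raidar.py | calculate_sentence_common
-- ===== SOURCE A (Python) =====
-- def tokenize_and_normalize(sentence):
--     # Tokenization and normalization
--     return [word.lower().strip() for word in sentence.split()]
--
-- def extract_ngrams(tokens, n):
--     # Extract n-grams from the list of tokens
--     return [' '.join(tokens[i:i+n]) for i in range(len(tokens) - n + 1)]
--
-- def common_elements(list1, list2):
--     # Find common elements between two lists
--     return set(list1) & set(list2)
--
-- def calculate_sentence_common(sentence1, sentence2):
--     tokens1 = tokenize_and_normalize(sentence1)
--     tokens2 = tokenize_and_normalize(sentence2)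
--
--     # Find common words
--     common_words = common_elements(tokens1, tokens2)
--
--     # Find common n-grams (let's say up to 3-grams for this example)
--     common_ngrams = set()
--
--     number_common_hierarchy = [len(list(common_words))]
--
--     for n in range(2, 5):  # 2-grams to 3-grams
--         ngrams1 = extract_ngrams(tokens1, n)
--         ngrams2 = extract_ngrams(tokens2, n)
--         common_ngrams = common_elements(ngrams1, ngrams2)
--         number_common_hierarchy.append(len(list(common_ngrams)))
--
--     return number_common_hierarchy
-- ===== SOURCE B (Python) =====
-- def calculate_sentence_common(sentence1, sentence2):
--     tokens1 = [w.lower().strip() for w in sentence1.split()]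
--     tokens2 = [w.lower().strip() for w in sentence2.split()]
--     result = []
--     for n in range(1, 5):
--         g1 = sorted(' '.join(tokens1[i:i + n]) for i in range(len(tokens1) - n + 1))
--         g2 = sorted(' '.join(tokens2[i:i + n]) for i in range(len(tokens2) - n + 1))
--         i = j = 0
--         last = None
--         count = 0
--         while i < len(g1) and j < len(g2):
--             if g1[i] < g2[j]:
--                 i += 1
--             elif g2[j] < g1[i]:
--                 j += 1
--             else:
--                 if last != g1[i]:
--                     count += 1
--                     last = g1[i]
--                 i += 1
--                 j += 1
--         result.append(count)
--     return result
-- ===== Notes on version B (the rewrite author's own statement) =====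
-- stated objective: alternative
-- what changed: Per-n counting is done by sorting both n-gram lists and counting distinct common values with a two-pointer merge scan over the sorted lists (no sets at all), instead of building two hash sets and intersecting them; the special-cased word count is folded into one uniform n=1..4 loop.
import Mathlib
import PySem

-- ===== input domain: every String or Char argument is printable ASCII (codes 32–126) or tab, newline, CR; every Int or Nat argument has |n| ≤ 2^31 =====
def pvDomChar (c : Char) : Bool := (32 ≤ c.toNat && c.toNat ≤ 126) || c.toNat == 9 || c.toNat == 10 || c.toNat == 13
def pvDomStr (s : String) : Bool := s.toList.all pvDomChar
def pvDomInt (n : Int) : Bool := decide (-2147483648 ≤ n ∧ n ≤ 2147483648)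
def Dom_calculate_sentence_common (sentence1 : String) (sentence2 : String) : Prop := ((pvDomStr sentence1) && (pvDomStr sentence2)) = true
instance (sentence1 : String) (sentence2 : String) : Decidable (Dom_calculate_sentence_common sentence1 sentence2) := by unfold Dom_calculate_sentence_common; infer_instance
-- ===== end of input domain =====

-- B counts each n's common n-grams by sorting both n-gram lists and running a two-pointer merge
-- scan (no hash sets), in one uniform n=1..4 loop (objective: alternative algorithm; not claimed faster).

-- ===== PORT A =====
def tokenize_and_normalize (sentence : String) : List String :=
  (PySem.Str.split₀ sentence).map (fun word => PySem.Str.strip (PySem.Str.lower word))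

def extract_ngrams (tokens : List String) (n : Int) : List String :=
  (PySem.List.pyRange 0 ((tokens.length : Int) - n + 1) 1).map
    (fun i => PySem.Str.join " " (PySem.List.slice tokens (some i) (some (i + n))))

def common_elements (list1 list2 : List String) : PySem.Set String :=
  PySem.Set.inter (PySem.Set.ofList list1) (PySem.Set.ofList list2)

def calculate_sentence_common (sentence1 : String) (sentence2 : String) : List Int :=
  let tokens1 := tokenize_and_normalize sentence1
  let tokens2 := tokenize_and_normalize sentence2
  let common_words := common_elements tokens1 tokens2
  let number_common_hierarchy : List Int := [PySem.Set.len common_words]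
  (PySem.List.pyRange 2 5 1).foldl (fun acc n =>
    let ngrams1 := extract_ngrams tokens1 n
    let ngrams2 := extract_ngrams tokens2 n
    let common_ngrams := common_elements ngrams1 ngrams2
    acc ++ [PySem.Set.len common_ngrams]) number_common_hierarchy

-- ===== PORT B =====
def pvTokens (sentence : String) : List String :=
  (PySem.Str.split₀ sentence).map (fun w => PySem.Str.strip (PySem.Str.lower w))

def pvNgrams (t : List String) (n : Int) : List String :=
  (PySem.List.pyRange 0 ((t.length : Int) - n + 1) 1).map
    (fun i => PySem.Str.join " " (PySem.List.slice t (some i) (some (i + n))))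

-- the two-pointer while loop over the sorted lists, as structural recursion on the suffixes
def pvMergeCount : List String → List String → Option String → Int → Int
  | [], _, _, count => count
  | _ :: _, [], _, count => count
  | a :: xs, b :: ys, last, count =>
    if a < b then pvMergeCount xs (b :: ys) last count
    else if b < a then pvMergeCount (a :: xs) ys last count
    else if last ≠ some a then pvMergeCount xs ys (some a) (count + 1)
    else pvMergeCount xs ys last count

def calculate_sentence_common_alt (sentence1 : String) (sentence2 : String) : List Int :=
  let tokens1 := pvTokens sentence1
  let tokens2 := pvTokens sentence2
  (PySem.List.pyRange 1 5 1).foldl (fun result n =>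
    let g1 := PySem.List.sorted (pvNgrams tokens1 n) (fun x => x) false
    let g2 := PySem.List.sorted (pvNgrams tokens2 n) (fun x => x) false
    result ++ [pvMergeCount g1 g2 none 0]) []

-- ===== PRECONDITION & SPEC =====
def Spec_calculate_sentence_common (sentence1 : String) (sentence2 : String) (out : List Int) : Prop := out = calculate_sentence_common_alt sentence1 sentence2
instance (sentence1 : String) (sentence2 : String) (out : List Int) : Decidable (Spec_calculate_sentence_common sentence1 sentence2 out) := by unfold Spec_calculate_sentence_common; infer_instance

-- ===== CLAIM (what is proved, stated in full; the proofs are below) =====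
def Claim_equal_calculate_sentence_common : Prop := ∀ (sentence1 : String) (sentence2 : String), Dom_calculate_sentence_common sentence1 sentence2 → Spec_calculate_sentence_common sentence1 sentence2 (calculate_sentence_common sentence1 sentence2)

-- ===== LEMMAS AND PROOFS =====

-- invariant of the merge scan over sorted lists: it adds the number of distinct values common
-- to both remaining lists and different from the last counted value
theorem pvMergeCount_eq (l1 : List String) : ∀ (l2 : List String) (last : Option String) (c : Int),
    l1.Pairwise (· ≤ ·) → l2.Pairwise (· ≤ ·) →
    (∀ v, last = some v → ∀ x ∈ l1, v ≤ x) →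
    (∀ v, last = some v → ∀ x ∈ l2, v ≤ x) →
    pvMergeCount l1 l2 last c =
      c + ((((l1.toFinset ∩ l2.toFinset)).filter (fun x => last ≠ some x)).card : Int) := by
  induction l1 with
  | nil => intro l2 last c _ _ _ _; simp [pvMergeCount]
  | cons a xs ih1 =>
    intro l2
    induction l2 with
    | nil => intro last c _ _ _ _; simp [pvMergeCount]
    | cons b ys ih2 =>
      intro last c h1 h2 hl1 hl2
      have hxs : xs.Pairwise (· ≤ ·) := h1.tail
      have hys : ys.Pairwise (· ≤ ·) := h2.tail
      have hax : ∀ x ∈ xs, a ≤ x := fun x hx => (List.pairwise_cons.mp h1).1 x hx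
      have hby : ∀ y ∈ ys, b ≤ y := fun y hy => (List.pairwise_cons.mp h2).1 y hy
      by_cases hab : a < b
      · rw [pvMergeCount, if_pos hab]
        rw [ih1 (b :: ys) last c hxs h2
          (fun v hv x hx => hl1 v hv x (List.mem_cons_of_mem a hx)) hl2]
        have hset : ((a :: xs).toFinset ∩ (b :: ys).toFinset).filter (fun x => last ≠ some x)
            = (xs.toFinset ∩ (b :: ys).toFinset).filter (fun x => last ≠ some x) := by
          apply Finset.ext
          intro x
          simp only [Finset.mem_filter, Finset.mem_inter, List.mem_toFinset, List.mem_cons]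
          constructor
          · rintro ⟨⟨hx1, hx2⟩, hx3⟩
            refine ⟨⟨?_, hx2⟩, hx3⟩
            refine hx1.resolve_left ?_
            rintro rfl
            rcases hx2 with h | h
            · exact absurd h (ne_of_lt hab)
            · exact absurd (hby x h) (not_le.mpr hab)
          · rintro ⟨⟨hx1, hx2⟩, hx3⟩; exact ⟨⟨Or.inr hx1, hx2⟩, hx3⟩
        rw [hset]
      · by_cases hba : b < a
        · rw [pvMergeCount, if_neg hab, if_pos hba]
          rw [ih2 last c h1 hys hl1
            (fun v hv y hy => hl2 v hv y (List.mem_cons_of_mem b hy))]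
          have hset : ((a :: xs).toFinset ∩ (b :: ys).toFinset).filter (fun x => last ≠ some x)
              = ((a :: xs).toFinset ∩ ys.toFinset).filter (fun x => last ≠ some x) := by
            apply Finset.ext
            intro x
            simp only [Finset.mem_filter, Finset.mem_inter, List.mem_toFinset, List.mem_cons]
            constructor
            · rintro ⟨⟨hx1, hx2⟩, hx3⟩
              refine ⟨⟨hx1, ?_⟩, hx3⟩
              refine hx2.resolve_left ?_
              rintro rfl
              rcases hx1 with h | h
              · exact absurd h (ne_of_lt hba)
              · exact absurd (hax x h) (not_le.mpr hba)
            · rintro ⟨⟨hx1, hx2⟩, hx3⟩; exact ⟨⟨hx1, Or.inr hx2⟩, hx3⟩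
          rw [hset]
        · have hEq : a = b := le_antisymm (not_lt.mp hba) (not_lt.mp hab)
          subst hEq
          by_cases hlast : last ≠ some a
          · rw [pvMergeCount, if_neg hab, if_neg hba, if_pos hlast]
            rw [ih1 ys (some a) (c + 1) hxs hys
              (fun v hv x hx => by cases hv; exact hax x hx)
              (fun v hv y hy => by cases hv; exact hby y hy)]
            have hset :
                ((a :: xs).toFinset ∩ (a :: ys).toFinset).filter (fun x => last ≠ some x)
                  = insert a ((xs.toFinset ∩ ys.toFinset).filter (fun x => (some a : Option String) ≠ some x)) := by
              apply Finset.ext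
              intro x
              simp only [Finset.mem_insert, Finset.mem_filter, Finset.mem_inter,
                List.mem_toFinset, List.mem_cons]
              constructor
              · rintro ⟨⟨hx1, hx2⟩, hx3⟩
                by_cases hxa : x = a
                · exact Or.inl hxa
                · exact Or.inr ⟨⟨hx1.resolve_left hxa, hx2.resolve_left hxa⟩,
                    by simpa using Ne.symm hxa⟩
              · rintro (rfl | ⟨⟨hx1, hx2⟩, hx3⟩)
                · exact ⟨⟨Or.inl rfl, Or.inl rfl⟩, hlast⟩
                · have hxa : x ≠ a := fun h => by simp [h] at hx3
                  refine ⟨⟨Or.inr hx1, Or.inr hx2⟩, ?_⟩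
                  intro hv
                  rcases last with _ | v
                  · simp at hv
                  · have hv' : v = x := by simpa using hv
                    subst hv'
                    have h1' : v ≤ a := hl1 v rfl a List.mem_cons_self
                    have h2' : a ≤ v := hax v hx1
                    exact hxa (le_antisymm h1' h2')
            rw [hset, Finset.card_insert_of_notMem (by simp)]
            push_cast
            ring
          · rw [pvMergeCount, if_neg hab, if_neg hba, if_neg hlast]
            have hlast' : last = some a := by
              by_contra h; exact hlast h
            subst hlast'
            rw [ih1 ys (some a) c hxs hys
              (fun v hv x hx => by cases hv; exact hax x hx)
              (fun v hv y hy => by cases hv; exact hby y hy)]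
            have hset :
                ((a :: xs).toFinset ∩ (a :: ys).toFinset).filter (fun x => (some a : Option String) ≠ some x)
                  = (xs.toFinset ∩ ys.toFinset).filter (fun x => (some a : Option String) ≠ some x) := by
              apply Finset.ext
              intro x
              simp only [Finset.mem_filter, Finset.mem_inter, List.mem_toFinset, List.mem_cons]
              constructor
              · rintro ⟨⟨hx1, hx2⟩, hx3⟩
                have hxa : x ≠ a := fun h => by simp [h] at hx3
                exact ⟨⟨hx1.resolve_left hxa, hx2.resolve_left hxa⟩, hx3⟩
              · rintro ⟨⟨hx1, hx2⟩, hx3⟩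
                exact ⟨⟨Or.inr hx1, Or.inr hx2⟩, hx3⟩
            rw [hset]

-- the length of A's intersection set is the cardinality of the finset intersection
theorem pv_len_inter (l1 l2 : List String) :
    PySem.Set.len (common_elements l1 l2) = ((l1.toFinset ∩ l2.toFinset).card : Int) := by
  unfold common_elements PySem.Set.len
  have hnd : (PySem.Set.inter (PySem.Set.ofList l1) (PySem.Set.ofList l2)).Nodup :=
    PySem.Set.nodup_inter _ _ (PySem.Set.nodup_ofList _)
  have : (PySem.Set.inter (PySem.Set.ofList l1) (PySem.Set.ofList l2)).toFinset
      = l1.toFinset ∩ l2.toFinset := by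
    apply Finset.ext
    intro x
    simp [PySem.Set.mem_inter, PySem.Set.mem_ofList]
  rw [← List.toFinset_card_of_nodup hnd, this]

-- B's per-n sorted merge count equals A's per-n intersection length
theorem pv_count_eq (g1 g2 : List String) :
    pvMergeCount (PySem.List.sorted g1 (fun x => x) false)
      (PySem.List.sorted g2 (fun x => x) false) none 0
    = PySem.Set.len (common_elements g1 g2) := by
  have hp1 := PySem.List.sorted_pairwise g1 (fun x => x)
  have hp2 := PySem.List.sorted_pairwise g2 (fun x => x)
  rw [pvMergeCount_eq _ _ none 0 hp1 hp2 (by simp) (by simp)]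
  have ht1 : (PySem.List.sorted g1 (fun x => x) false).toFinset = g1.toFinset := by
    apply Finset.ext; intro x; simp [PySem.List.mem_sorted]
  have ht2 : (PySem.List.sorted g2 (fun x => x) false).toFinset = g2.toFinset := by
    apply Finset.ext; intro x; simp [PySem.List.mem_sorted]
  rw [ht1, ht2, pv_len_inter]
  simp

-- 1-grams are the tokens themselves
theorem pv_ngrams_one (t : List String) : extract_ngrams t 1 = t := by
  unfold extract_ngrams
  have hn : ((t.length : Int) - 1 + 1) = (t.length : Int) := by ring
  rw [hn]
  have hmem : ∀ i ∈ PySem.List.pyRange 0 (t.length : Int) 1,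
      PySem.Str.join " " (PySem.List.slice t (some i) (some (i + 1)))
      = PySem.List.pyGetD t i "" := by
    intro i hi
    rw [PySem.List.mem_pyRange_one] at hi
    obtain ⟨h0, hl⟩ := hi
    obtain ⟨k, rfl⟩ := Int.eq_ofNat_of_zero_le h0
    have hk : k < t.length := by exact_mod_cast hl
    have hslice : PySem.List.slice t (some (k : Int)) (some ((k : Int) + 1))
        = [t[k]] := by
      rw [show ((k : Int) + 1) = ((k + 1 : Nat) : Int) by push_cast; ring,
        PySem.List.slice_natCast]
      have h1 : k + 1 - k = 1 := by omega
      rw [h1]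
      rw [List.take_one_drop_eq_of_lt_length hk]
      simp
    rw [hslice]
    have hjoin : PySem.Str.join " " [t[k]] = t[k] := by
      apply String.ext
      rw [PySem.Str.toList_join]
      simp [PySem.Chars.join_singleton]
    rw [hjoin, PySem.List.pyGetD_natCast]
    simp [hk]
  rw [List.map_congr_left hmem]
  exact PySem.List.map_pyGetD_pyRange_zero t ""

-- B's tokens and n-grams are literally A's helpers
theorem pv_tokens_eq (s : String) : pvTokens s = tokenize_and_normalize s := rfl
theorem pv_ngrams_eq (t : List String) (n : Int) : pvNgrams t n = extract_ngrams t n := rfl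

-- ===== VERDICT (by name: the statement is the Claim_ definition above) =====
theorem calculate_sentence_common_spec : Claim_equal_calculate_sentence_common := by
  intro s1 s2 _
  unfold Spec_calculate_sentence_common
  unfold calculate_sentence_common calculate_sentence_common_alt
  rw [pv_tokens_eq s1, pv_tokens_eq s2]
  rw [show PySem.List.pyRange 2 5 1 = [2, 3, 4] from by decide,
      show PySem.List.pyRange 1 5 1 = [1, 2, 3, 4] from by decide]
  simp only [List.foldl_cons, List.foldl_nil, pv_ngrams_eq]
  rw [pv_count_eq, pv_count_eq, pv_count_eq, pv_count_eq, pv_ngrams_one, pv_ngrams_one]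
  simp
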